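-- pv_equiv track=rewrite | github.com/p1carats/aoc-2022 | 5/day5.py | crates
-- ===== SOURCE A (Python) =====
-- from itertools import zip_longest
-- import string
--
-- def intersection(list1, list2):
--     res = [value for value in list1 if value in list2]
--     res.reverse()
--     return res
--
-- def crates(input):
--     crates = []
--     transposed = list(zip_longest(*input))
--     transposed = [list(sublist) for sublist in transposed]
--     for i in range(len(transposed)):
--         if len(intersection(transposed[i], list(string.ascii_uppercase))) > 0:
--             crates.append(intersection(transposed[i], list(string.ascii_uppercase)))
--     return crates
-- ===== SOURCE B (Python) =====
-- import string
--
-- def crates(input):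
--     # One bottom-up pass over the rows: merge each row into per-column
--     # accumulators, never building the padded transpose.
--     upper = set(string.ascii_uppercase)
--     cols = []
--     for row in reversed(input):
--         merged = []
--         rest = cols
--         for ch in row:
--             col = rest[0] if rest else []
--             rest = rest[1:] if rest else []
--             if ch in upper:
--                 col = col + [ch]
--             merged.append(col)
--         cols = merged + rest
--     return [c for c in cols if c]
-- ===== Notes on version B (the rewrite author's own statement) =====
-- stated objective: faster
-- what changed: Replaces the zip_longest transpose plus a per-column double intersection-filter (list-membership against a 26-element list, computed twice) with a single bottom-up pass over the rows that merges each row's uppercase letters into per-column accumulator lists using a set-membership test.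
import Mathlib
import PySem

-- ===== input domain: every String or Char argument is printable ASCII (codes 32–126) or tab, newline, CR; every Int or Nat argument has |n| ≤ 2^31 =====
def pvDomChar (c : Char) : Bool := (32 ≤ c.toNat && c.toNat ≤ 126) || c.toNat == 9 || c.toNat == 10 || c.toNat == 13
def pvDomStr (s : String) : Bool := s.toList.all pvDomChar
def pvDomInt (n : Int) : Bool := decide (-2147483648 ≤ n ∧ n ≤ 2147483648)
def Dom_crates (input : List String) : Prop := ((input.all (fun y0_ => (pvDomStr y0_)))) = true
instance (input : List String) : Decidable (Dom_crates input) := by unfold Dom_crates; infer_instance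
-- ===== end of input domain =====

-- B replaces the padded transpose + double intersection pass of A with one
-- bottom-up merge of the rows into per-column accumulators (alternative decomposition).

-- ===== PORT A =====
-- list(string.ascii_uppercase): the 26 uppercase letters as one-character strings
def pvUpperStrs : List String :=
  ("ABCDEFGHIJKLMNOPQRSTUVWXYZ".toList).map (fun c => String.singleton c)

-- intersection(list1, list2): filter list1 by membership in list2, then reverse.
-- list1's elements come from zip_longest, so they are Option String (none = the
-- None fill value); none is never a member of list2, so filtering and unwrapping
-- in one filterMap step is exact.
def pyIntersection (l1 : List (Option String)) (l2 : List String) : List String :=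
  (l1.filterMap (fun v => match v with
      | some s => if l2.contains s then some s else none
      | none => none)).reverse

-- exact model of [list(t) for t in zip_longest(*input)]: one column per index up
-- to the longest row, each column one (Option) entry per row, None-padded
def zipLongestCols (rows : List (List Char)) : List (List (Option String)) :=
  (List.range (rows.foldl (fun a r => max a r.length) 0)).map
    (fun i => rows.map (fun r => (r[i]?).map (fun c => String.singleton c)))

def crates (input : List String) : List (List String) :=
  let transposed := zipLongestCols (input.map String.toList)
  (List.range transposed.length).foldl (fun acc i =>
    if 0 < (pyIntersection (transposed.getD i []) pvUpperStrs).length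
    then acc ++ [pyIntersection (transposed.getD i []) pvUpperStrs]
    else acc) []

-- ===== PORT B =====
-- set(string.ascii_uppercase)
def pvUpperSet : PySem.Set String :=
  PySem.Set.ofList (("ABCDEFGHIJKLMNOPQRSTUVWXYZ".toList).map (fun c => String.singleton c))

-- the inner loop of Source B: walk one row, consuming the existing column
-- accumulators ('rest') in step and appending this row's uppercase letters
def mergeRow : List Char → List (List String) → List (List String)
  | [], rest => rest
  | c :: r, rest =>
      let col := rest.headD []
      let col := if PySem.Set.contains pvUpperSet (String.singleton c)
                 then col ++ [String.singleton c] else col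
      col :: mergeRow r rest.tail

def crates_alt (input : List String) : List (List String) :=
  (((input.map String.toList).reverse).foldl (fun cols row => mergeRow row cols) []).filter
    (fun c => !c.isEmpty)

-- ===== PRECONDITION & SPEC =====
def Spec_crates (input : List String) (out : List (List String)) : Prop := out = crates_alt input
instance (input : List String) (out : List (List String)) : Decidable (Spec_crates input out) := by unfold Spec_crates; infer_instance

-- ===== CLAIM (what is proved, stated in full; the proofs are below) =====
def Claim_equal_crates : Prop := ∀ (input : List String), Dom_crates input → Spec_crates input (crates input)

-- ===== LEMMAS AND PROOFS =====

-- the contribution of row r to column i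
def pvPick (i : Nat) (r : List Char) : Option String :=
  match r[i]? with
  | some c => if pvUpperStrs.contains (String.singleton c) then some (String.singleton c) else none
  | none => none

def pvMaxlen (rows : List (List Char)) : Nat := rows.foldl (fun a r => max a r.length) 0

def pvColsSpec (p : List (List Char)) : List (List String) :=
  (List.range (pvMaxlen p)).map (fun i => p.filterMap (pvPick i))

theorem pv_range_getD {α : Type} (f : Nat → α) (d : α) {m i : Nat} (h : i < m) :
    ((List.range m).map f).getD i d = f i := by
  simp [List.getD, h]

theorem pv_range_map_getD {α : Type} (cols : List α) (d : α) :
    (List.range cols.length).map (fun i => cols.getD i d) = cols := by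
  induction cols with
  | nil => simp
  | cons x cs ih =>
      simp only [List.length_cons, List.range_succ_eq_map, List.map_cons, List.map_map]
      exact congrArg (x :: ·) ih

theorem pv_mergeRow_eq (r : List Char) : ∀ (cols : List (List String)),
    mergeRow r cols = (List.range (max r.length cols.length)).map
      (fun i => cols.getD i [] ++ (pvPick i r).toList) := by
  induction r with
  | nil =>
      intro cols
      simp only [mergeRow, List.length_nil, Nat.zero_max, pvPick]
      simpa using (pv_range_map_getD cols []).symm
  | cons c r' ih =>
      intro cols
      have hM : max (c :: r').length cols.length = max r'.length cols.tail.length + 1 := by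
        cases cols <;> simp
      rw [mergeRow, hM, List.range_succ_eq_map, List.map_cons, List.map_map, ih cols.tail]
      congr 1
      · have hset : PySem.Set.contains pvUpperSet (String.singleton c)
            = pvUpperStrs.contains (String.singleton c) := by
          simp [pvUpperSet, pvUpperStrs, PySem.Set.contains, PySem.Set.mem_ofList]
        simp only [pvPick, List.getElem?_cons_zero, hset]
        cases cols <;> split <;> simp
      · apply List.map_congr_left
        intro i _
        have h1 : pvPick (i + 1) (c :: r') = pvPick i r' := by
          simp [pvPick]
        simp only [Function.comp]
        cases cols <;> simp [h1]

theorem pv_le_maxlen {rows : List (List Char)} {r : List Char} (h : r ∈ rows) :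
    r.length ≤ pvMaxlen rows := by
  have key : ∀ (l : List (List Char)) (a : Nat), r ∈ l →
      r.length ≤ l.foldl (fun a r => max a r.length) a := by
    intro l
    induction l with
    | nil => intro a h; cases h
    | cons x xs ih =>
        intro a h
        rcases List.mem_cons.mp h with h | h
        · subst h
          have : ∀ (l' : List (List Char)) (b : Nat),
              b ≤ l'.foldl (fun a r => max a r.length) b := by
            intro l'
            induction l' with
            | nil => intro b; exact le_refl b
            | cons y ys ih2 => intro b; exact le_trans (Nat.le_max_left _ _) (ih2 _)
          exact le_trans (Nat.le_max_right a r.length) (this xs _)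
        · exact ih _ h
  exact key rows 0 h

theorem pv_pick_none {p : List (List Char)} {i : Nat} (h : pvMaxlen p ≤ i) :
    p.filterMap (pvPick i) = [] := by
  rw [List.filterMap_eq_nil_iff]
  intro r hr
  have : r.length ≤ i := le_trans (pv_le_maxlen hr) h
  simp [pvPick, List.getElem?_eq_none this]

theorem pv_foldl_max_acc (l : List (List Char)) : ∀ a : Nat,
    l.foldl (fun a r => max a r.length) a = max a (l.foldl (fun a r => max a r.length) 0) := by
  induction l with
  | nil => intro a; simp
  | cons x xs ih => intro a; simp only [List.foldl_cons]; rw [ih, ih (max 0 _)]; omega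

theorem pv_maxlen_reverse (p : List (List Char)) : pvMaxlen p.reverse = pvMaxlen p := by
  induction p with
  | nil => rfl
  | cons x xs ih =>
      simp only [pvMaxlen, List.reverse_cons, List.foldl_append, List.foldl_cons,
        List.foldl_nil] at *
      rw [ih, pv_foldl_max_acc xs (max 0 x.length)]
      omega

theorem pv_mergeRow_spec (p : List (List Char)) (r : List Char) :
    mergeRow r (pvColsSpec p) = pvColsSpec (p ++ [r]) := by
  rw [pv_mergeRow_eq]
  have hlen : (pvColsSpec p).length = pvMaxlen p := by simp [pvColsSpec]
  have hM : pvMaxlen (p ++ [r]) = max r.length (pvMaxlen p) := by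
    simp only [pvMaxlen, List.foldl_append, List.foldl_cons, List.foldl_nil]
    omega
  rw [hlen]
  conv_rhs => rw [pvColsSpec, hM]
  apply List.map_congr_left
  intro i hi
  have hget : (pvColsSpec p).getD i [] = p.filterMap (pvPick i) := by
    by_cases h : i < pvMaxlen p
    · exact pv_range_getD _ _ h
    · rw [List.getD_eq_default _ _ (by rw [hlen]; omega), pv_pick_none (by omega)]
  rw [hget, List.filterMap_append]
  cases h : pvPick i r <;> simp [h]

theorem pv_foldl_mergeRow (p : List (List Char)) :
    p.foldl (fun cols row => mergeRow row cols) [] = pvColsSpec p := by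
  induction p using List.reverseRecOn with
  | nil => rfl
  | append_singleton p r ih =>
      rw [List.foldl_append, List.foldl_cons, List.foldl_nil, ih, pv_mergeRow_spec]

theorem pv_foldl_append_if {α β : Type} (l : List α) (p : α → Prop) [DecidablePred p]
    (f : α → β) : ∀ acc : List β,
    l.foldl (fun acc i => if p i then acc ++ [f i] else acc) acc
      = acc ++ (l.filter (fun i => decide (p i))).map f := by
  induction l with
  | nil => intro acc; simp
  | cons x xs ih =>
      intro acc
      by_cases h : p x <;> simp [h, ih]

theorem pv_col_eq (rows : List (List Char)) (i : Nat) :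
    pyIntersection (rows.map (fun r => (r[i]?).map (fun c => String.singleton c))) pvUpperStrs
      = rows.reverse.filterMap (pvPick i) := by
  rw [pyIntersection, List.filterMap_map, List.filterMap_reverse]
  have hf : ((fun v => match v with
      | some s => if pvUpperStrs.contains s then some s else none
      | none => none) ∘ fun r : List Char => (r[i]?).map (fun c => String.singleton c))
      = pvPick i := by
    funext r
    simp only [Function.comp]
    cases h : r[i]? <;> simp [pvPick, h]
  rw [hf]

theorem pv_bool_eq (c : List String) :
    (decide (0 < c.length)) = !c.isEmpty := by
  cases c <;> simp

-- ===== VERDICT (by name: the statement is the Claim_ definition above) =====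
theorem crates_spec : Claim_equal_crates := by
  intro input _
  unfold Spec_crates crates crates_alt zipLongestCols
  rw [pv_foldl_mergeRow, pvColsSpec, pv_maxlen_reverse]
  simp only [List.length_map, List.length_range]
  rw [pv_foldl_append_if, List.nil_append, List.filter_map]
  have hcong : ∀ i ∈ List.range ((input.map String.toList).foldl (fun a r => max a r.length) 0),
      pyIntersection
        (((List.range ((input.map String.toList).foldl (fun a r => max a r.length) 0)).map
          (fun i => (input.map String.toList).map
            (fun r => (r[i]?).map (fun c => String.singleton c)))).getD i [])
        pvUpperStrs
      = (input.map String.toList).reverse.filterMap (pvPick i) := by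
    intro i hi
    rw [pv_range_getD _ _ (List.mem_range.mp hi), pv_col_eq]
  rw [List.filter_congr (fun i hi => by rw [hcong i hi, pv_bool_eq])]
  apply List.map_congr_left
  intro i hi
  exact hcong i (List.mem_of_mem_filter hi)
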